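-- pv_equiv track=rewrite | github.com/garywei944/ChemFlow | experiments/utils/utils.py | partitionIndexes
-- ===== SOURCE A (Python) =====
-- def partitionIndexes(totalsize, numberofpartitions):
--     # Compute the chunk size (integer division; i.e. assuming Python 2.7)
--     chunksize = totalsize // numberofpartitions
--     # How many chunks need an extra 1 added to the size?
--     remainder = totalsize - chunksize * numberofpartitions
--     a = 0
--     for i in range(numberofpartitions):
--         b = a + chunksize + (i < remainder)
--         # Yield the inclusive-inclusive range
--         yield a
--         a = b
-- ===== SOURCE B (Python) =====
-- def partitionIndexes(totalsize, numberofpartitions):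
--     chunksize = totalsize // numberofpartitions
--     remainder = totalsize % numberofpartitions
--     for i in range(numberofpartitions):
--         # closed-form start index: no running accumulator
--         yield i * chunksize + min(i, remainder)
-- ===== Notes on version B (the rewrite author's own statement) =====
-- stated objective: alternative
-- what changed: Replaces the accumulator-passing cumulative formulation (yield a; a = a + chunksize + (i < remainder)) with a direct per-index closed form i*chunksize + min(i, remainder), eliminating the maintained state.
import Mathlib
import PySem

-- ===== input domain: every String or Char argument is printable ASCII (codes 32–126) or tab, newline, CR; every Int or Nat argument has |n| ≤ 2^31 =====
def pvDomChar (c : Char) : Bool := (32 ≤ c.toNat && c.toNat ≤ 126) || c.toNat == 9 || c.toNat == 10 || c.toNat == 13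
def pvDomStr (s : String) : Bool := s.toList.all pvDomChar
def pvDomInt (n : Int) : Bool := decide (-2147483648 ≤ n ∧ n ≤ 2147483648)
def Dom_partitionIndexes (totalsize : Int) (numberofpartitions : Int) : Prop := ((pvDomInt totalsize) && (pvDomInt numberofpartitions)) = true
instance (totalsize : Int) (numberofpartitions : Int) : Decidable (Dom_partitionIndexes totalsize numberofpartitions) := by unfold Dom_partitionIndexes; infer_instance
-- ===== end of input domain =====

-- B replaces A's running accumulator with a closed-form per-index start i*chunksize + min(i, remainder) (alternative decomposition, same O(n) cost).

-- ===== PORT A =====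
def partitionIndexes (totalsize : Int) (numberofpartitions : Int) : List Int :=
  let chunksize := PySem.Int.floordiv totalsize numberofpartitions
  let remainder := totalsize - chunksize * numberofpartitions
  ((PySem.List.pyRange 0 numberofpartitions 1).foldl
    (fun (st : Int × List Int) i =>
      let b := st.1 + chunksize + (if i < remainder then 1 else 0)
      (b, st.2 ++ [st.1]))
    (0, [])).2

-- ===== PORT B =====
def partitionIndexes_alt (totalsize : Int) (numberofpartitions : Int) : List Int :=
  let chunksize := PySem.Int.floordiv totalsize numberofpartitions
  let remainder := PySem.Int.mod totalsize numberofpartitions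
  (PySem.List.pyRange 0 numberofpartitions 1).map
    (fun i => i * chunksize + min i remainder)

-- ===== PRECONDITION & SPEC =====
-- Pre_ excludes exactly numberofpartitions = 0, where the Python A raises ZeroDivisionError.
def Pre_partitionIndexes (totalsize : Int) (numberofpartitions : Int) : Prop := numberofpartitions ≠ 0
instance (totalsize : Int) (numberofpartitions : Int) : Decidable (Pre_partitionIndexes totalsize numberofpartitions) := by unfold Pre_partitionIndexes; infer_instance
def pvWitness_partitionIndexes : Int × Int := (10, 3)

def Spec_partitionIndexes (totalsize : Int) (numberofpartitions : Int) (out : List Int) : Prop := out = partitionIndexes_alt totalsize numberofpartitions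
instance (totalsize : Int) (numberofpartitions : Int) (out : List Int) : Decidable (Spec_partitionIndexes totalsize numberofpartitions out) := by unfold Spec_partitionIndexes; infer_instance

-- ===== CLAIM (what is proved, stated in full; the proofs are below) =====
def Claim_equal_partitionIndexes : Prop := ∀ (totalsize : Int) (numberofpartitions : Int), Dom_partitionIndexes totalsize numberofpartitions → Pre_partitionIndexes totalsize numberofpartitions → Spec_partitionIndexes totalsize numberofpartitions (partitionIndexes totalsize numberofpartitions)

-- ===== LEMMAS AND PROOFS =====

-- The accumulator after processing 0..m-1 is the closed form at m, and the yields collected are the closed forms at 0..m-1.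
theorem pv_fold_closed (c r : Int) (hr : 0 ≤ r) (m : Nat) :
    ((List.range m).map (fun (k : Nat) => (k : Int))).foldl
      (fun (st : Int × List Int) i =>
        ((st.1 + c + (if i < r then 1 else 0)), st.2 ++ [st.1]))
      (0, [])
    = ((m : Int) * c + min (m : Int) r,
       ((List.range m).map (fun (k : Nat) => (k : Int))).map
         (fun i => i * c + min i r)) := by
  induction m with
  | zero => simp; omega
  | succ m ih =>
    rw [List.range_succ, List.map_append, List.foldl_append, ih, List.map_append]
    simp only [List.map_cons, List.map_nil, List.foldl_cons, List.foldl_nil]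
    refine Prod.ext ?_ rfl
    push_cast
    have hc : ((m : Int) + 1) * c = (m : Int) * c + c := by ring
    rw [hc]
    split_ifs with h <;> omega

theorem partitionIndexes_spec : Claim_equal_partitionIndexes := by
  intro t n _ hn
  unfold Spec_partitionIndexes partitionIndexes partitionIndexes_alt
  have hmod : PySem.Int.mod t n = t - PySem.Int.floordiv t n * n := by
    have := PySem.Int.floordiv_mul_add_mod t n
    omega
  rw [hmod, PySem.List.pyRange_one]
  simp only [sub_zero, zero_add]
  rcases lt_or_gt_of_ne hn with hneg | hpos
  · rw [Int.toNat_of_nonpos (by omega)]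
    simp
  · have hr : 0 ≤ t - PySem.Int.floordiv t n * n := by
      have h1 := PySem.Int.mod_eq_emod_of_pos (a := t) (b := n) hpos
      have h2 := Int.emod_nonneg t (by omega : n ≠ 0)
      omega
    rw [pv_fold_closed _ _ hr]
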